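-- pv_equiv track=rewrite | github.com/csgear/competitive | usaco/chapter1/beads.py | max_beads_n2
-- ===== SOURCE A (Python) =====
-- def max_beads_n2(necklace):
--     '''O(N^2) brute force'''
--     necklace += necklace
--     n = len(necklace)
--     max_count = 0
--
--     for i in range(n-1):
--         left = i
--         current_color = necklace[left]
--         count_left = 0
--         while left >= 0 and (necklace[left] == current_color or necklace[left] == 'w'):
--             count_left += 1
--             left -= 1
--             if left < 0:
--                 break
--             if current_color == 'w' and necklace[left] != 'w':
--                 current_color = necklace[left]
--
--         right = i + 1
--         current_color = necklace[right]
--         count_right = 0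
--         while right < n and (necklace[right] == current_color or necklace[right] == 'w'):
--             count_right += 1
--             right += 1
--             if right >= n:
--                 break
--             if current_color == 'w' and necklace[right] != 'w':
--                 current_color = necklace[right]
--
--         total = count_left + count_right
--         if total > max_count:
--             max_count = total
--         # Ensure we don't exceed the necklace length
--         if max_count >= n / 2:
--             max_count = n // 2
--             break
--
--     return max_count
-- ===== SOURCE B (Python) =====
-- def max_beads_n2(necklace):
--     '''O(N): one forward and one backward pass precompute, for every break
--     point in the doubled necklace, how many beads the left and right scans
--     collect; answer = min(len, best adjacent pair).'''
--     s = necklace + necklace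
--     m = len(s)
--
--     def run_lengths(t):
--         # out[k] = longest suffix of t[:k+1] containing at most one distinct non-'w' bead
--         out = []
--         cur = 0          # that longest-suffix length
--         color = None     # its unique non-'w' bead, if any
--         wtail = 0        # trailing run of 'w's
--         for x in t:
--             if x == 'w':
--                 cur += 1
--                 wtail += 1
--             elif color is None or x == color:
--                 cur += 1
--                 color = x
--                 wtail = 0
--             else:
--                 cur = wtail + 1
--                 color = x
--                 wtail = 0
--             out.append(cur)
--         return out
--
--     left = run_lengths(s)
--     right_rev = run_lengths(s[::-1])
--     right = right_rev[::-1]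
--
--     best = 0
--     for i in range(m - 1):
--         t = left[i] + right[i + 1]
--         if t > best:
--             best = t
--     return min(len(necklace), best)
-- ===== Notes on version B (the rewrite author's own statement) =====
-- stated objective: faster
-- what changed: Instead of re-scanning left and right from every break point of the doubled necklace (O(N) work per point), B precomputes in one forward and one backward pass, for every position, the length of the longest segment ending/starting there with at most one distinct non-wildcard colour, then takes min(len, best adjacent pair) in a single sweep.
import Mathlib
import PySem

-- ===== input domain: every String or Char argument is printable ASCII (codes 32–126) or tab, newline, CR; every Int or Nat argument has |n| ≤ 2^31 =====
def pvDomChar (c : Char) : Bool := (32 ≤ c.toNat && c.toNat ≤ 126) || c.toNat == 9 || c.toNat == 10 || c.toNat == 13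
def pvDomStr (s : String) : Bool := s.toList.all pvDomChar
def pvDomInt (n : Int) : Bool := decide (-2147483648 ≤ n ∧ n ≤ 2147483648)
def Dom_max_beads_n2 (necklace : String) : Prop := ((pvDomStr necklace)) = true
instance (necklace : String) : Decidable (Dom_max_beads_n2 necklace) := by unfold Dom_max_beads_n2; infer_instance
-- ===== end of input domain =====

-- B replaces A's per-break-point O(N) left/right while-scans by two O(N) passes
-- precomputing all directional run lengths (objective: faster, O(N^2) → O(N)).

-- ===== PORT A =====
-- A's inner `while left >= 0 and (necklace[left]==current_color or necklace[left]=='w')` loop.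
-- The index is always in range on every call A makes (0 ≤ left < len s); the `none` arm of
-- pyGet? (Python's IndexError) is unreachable there.
def pvLeftScan (s : List Char) (left : Int) (c : Char) (cnt : Int) : Int :=
  if _h : 0 ≤ left then
    match PySem.List.pyGet? s left with
    | none => cnt
    | some x =>
      if x = c ∨ x = 'w' then
        let cnt' := cnt + 1
        let left' := left - 1
        if left' < 0 then cnt'
        else
          pvLeftScan s left'
            (if c = 'w' ∧ PySem.List.pyGetD s left' ' ' ≠ 'w' then PySem.List.pyGetD s left' ' ' else c)
            cnt'
      else cnt
  else cnt
termination_by (left + 1).toNat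
decreasing_by simp_all

-- A's inner `while right < n and (…)` loop (same remark on pyGet?).
def pvRightScan (s : List Char) (n : Int) (right : Int) (c : Char) (cnt : Int) : Int :=
  if _h : right < n then
    match PySem.List.pyGet? s right with
    | none => cnt
    | some x =>
      if x = c ∨ x = 'w' then
        let cnt' := cnt + 1
        let right' := right + 1
        if n ≤ right' then cnt'
        else
          pvRightScan s n right'
            (if c = 'w' ∧ PySem.List.pyGetD s right' ' ' ≠ 'w' then PySem.List.pyGetD s right' ' ' else c)
            cnt'
      else cnt
  else cnt
termination_by (n - right).toNat
decreasing_by simp_all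

-- A's `for i in range(n-1)` loop with its early `break`.
-- Python's `max_count >= n/2` is a float comparison; it is ported as `n ≤ 2*maxc`,
-- exact because both sides are integers (and n = 2*len(necklace) is even).
def pvMainLoop (s : List Char) (n : Int) (i : Int) (maxc : Int) : Int :=
  if h : i < n - 1 then
    let cl := pvLeftScan s i (PySem.List.pyGetD s i ' ') 0
    let cr := pvRightScan s n (i + 1) (PySem.List.pyGetD s (i + 1) ' ') 0
    let total := cl + cr
    let maxc' := if maxc < total then total else maxc
    if n ≤ 2 * maxc' then PySem.Int.floordiv n 2
    else pvMainLoop s n (i + 1) maxc'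
  else maxc
termination_by (n - 1 - i).toNat
decreasing_by simp_all

def max_beads_n2 (necklace : String) : Int :=
  let s := necklace.toList ++ necklace.toList
  let n : Int := (s.length : Int)
  pvMainLoop s n 0 0

-- ===== PORT B =====
-- one step of B's run_lengths pass; state = (out, cur, color, wtail)
def pvStep (acc : List Int × Int × Option Char × Int) (x : Char) :
    List Int × Int × Option Char × Int :=
  match acc with
  | (out, cur, color, wtail) =>
    if x = 'w' then (out ++ [cur + 1], cur + 1, color, wtail + 1)
    else
      match color with
      | none => (out ++ [cur + 1], cur + 1, some x, 0)
      | some c =>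
        if x = c then (out ++ [cur + 1], cur + 1, some c, 0)
        else (out ++ [wtail + 1], wtail + 1, some x, 0)

def pvRunLengths (t : List Char) : List Int := (t.foldl pvStep ([], 0, none, 0)).1

def max_beads_n2_alt (necklace : String) : Int :=
  let s := necklace.toList ++ necklace.toList
  let m : Int := (s.length : Int)
  let left := pvRunLengths s
  let right := (pvRunLengths s.reverse).reverse
  let best := (PySem.List.pyRange 0 (m - 1) 1).foldl
    (fun b i =>
      let t := PySem.List.pyGetD left i 0 + PySem.List.pyGetD right (i + 1) 0
      if b < t then t else b) 0
  min (necklace.toList.length : Int) best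

-- ===== PRECONDITION & SPEC =====
def Spec_max_beads_n2 (necklace : String) (out : Int) : Prop := out = max_beads_n2_alt necklace
instance (necklace : String) (out : Int) : Decidable (Spec_max_beads_n2 necklace out) := by unfold Spec_max_beads_n2; infer_instance

-- ===== CLAIM (what is proved, stated in full; the proofs are below) =====
def Claim_equal_max_beads_n2 : Prop := ∀ (necklace : String), Dom_max_beads_n2 necklace → Spec_max_beads_n2 necklace (max_beads_n2 necklace)

-- ===== LEMMAS AND PROOFS =====

-- spec: length of the longest prefix containing at most one distinct non-'w' bead
-- (col = the non-'w' bead already committed to, if any)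
def pvOkLen : List Char → Option Char → Int
  | [], _ => 0
  | x :: r, col =>
    if x = 'w' then 1 + pvOkLen r col
    else
      match col with
      | none => 1 + pvOkLen r (some x)
      | some c => if x = c then 1 + pvOkLen r (some c) else 0

-- structural model of A's while-scans (the scanned chars as a list);
-- pvUpd is the peeking colour update `if current_color=='w' and s[next]!='w': …`
def pvUpd (c : Char) (r : List Char) : Char :=
  match r with
  | [] => c
  | y :: _ => if c = 'w' ∧ y ≠ 'w' then y else c

def pvScanM : List Char → Char → Int
  | [], _ => 0
  | x :: r, c => if x = c ∨ x = 'w' then 1 + pvScanM r (pvUpd c r) else 0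

def pvFirstNonW : List Char → Option Char
  | [] => none
  | x :: r => if x = 'w' then pvFirstNonW r else some x

def pvWCount : List Char → Int
  | [] => 0
  | x :: r => if x = 'w' then 1 + pvWCount r else 0

def pvRep (col : Option Char) (t : List Char) : Char :=
  match col, t with
  | some c, _ => c
  | none, [] => 'w'
  | none, x :: _ => if x = 'w' then 'w' else x

theorem pvRep_some (c : Char) (t : List Char) : pvRep (some c) t = c := by
  cases t <;> rfl

theorem pvUpd_of_ne {c : Char} (hc : c ≠ 'w') (r : List Char) : pvUpd c r = c := by
  cases r <;> simp [pvUpd, hc]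

theorem pvUpd_w_eq_rep (r : List Char) : pvUpd 'w' r = pvRep none r := by
  cases r with
  | nil => rfl
  | cons y r' => by_cases hy : y = 'w' <;> simp [pvUpd, pvRep, hy]

theorem pvOkLen_w (r : List Char) (col : Option Char) :
    pvOkLen ('w' :: r) col = 1 + pvOkLen r col := by simp [pvOkLen]

theorem pvOkLen_cons_none {x : Char} (hx : x ≠ 'w') (r : List Char) :
    pvOkLen (x :: r) none = 1 + pvOkLen r (some x) := by simp [pvOkLen, hx]

theorem pvOkLen_cons_some_eq {x : Char} (hx : x ≠ 'w') (r : List Char) :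
    pvOkLen (x :: r) (some x) = 1 + pvOkLen r (some x) := by simp [pvOkLen, hx]

theorem pvOkLen_cons_some_ne {x c : Char} (hx : x ≠ 'w') (hxc : x ≠ c) (r : List Char) :
    pvOkLen (x :: r) (some c) = 0 := by simp [pvOkLen, hx, hxc]

theorem pvScanM_cons_pos {x c : Char} (h : x = c ∨ x = 'w') (r : List Char) :
    pvScanM (x :: r) c = 1 + pvScanM r (pvUpd c r) := by simp [pvScanM, h]

theorem pvScanM_cons_neg {x c : Char} (h1 : x ≠ c) (h2 : x ≠ 'w') (r : List Char) :
    pvScanM (x :: r) c = 0 := by simp [pvScanM, h1, h2]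

theorem pvScanM_eq_okLen : ∀ (t : List Char) (col : Option Char), col ≠ some 'w' →
    pvScanM t (pvRep col t) = pvOkLen t col := by
  intro t
  induction t with
  | nil => intro col _; simp [pvScanM, pvOkLen]
  | cons x r ih =>
    intro col hcol
    cases col with
    | none =>
      by_cases hx : x = 'w'
      · subst hx
        have h1 : pvRep none ('w' :: r) = 'w' := by simp [pvRep]
        rw [h1, pvScanM_cons_pos (Or.inr rfl), pvUpd_w_eq_rep, ih none (by simp),
          pvOkLen_w]
      · have h1 : pvRep none (x :: r) = x := by simp [pvRep, hx]
        have h2 := ih (some x) (by simp [hx])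
        rw [pvRep_some] at h2
        rw [h1, pvScanM_cons_pos (Or.inl rfl), pvUpd_of_ne hx, h2, pvOkLen_cons_none hx]
    | some c =>
      have hc : c ≠ 'w' := by intro h; exact hcol (by rw [h])
      have h2 := ih (some c) hcol
      rw [pvRep_some] at h2
      rw [pvRep_some]
      by_cases hg : x = c ∨ x = 'w'
      · rw [pvScanM_cons_pos hg, pvUpd_of_ne hc, h2]
        rcases hg with h | h
        · subst h; rw [pvOkLen_cons_some_eq (by simpa using hc)]
        · subst h; rw [pvOkLen_w]
      · rw [not_or] at hg
        rw [pvScanM_cons_neg hg.1 hg.2, pvOkLen_cons_some_ne hg.2 hg.1]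

theorem pvRightScan_model (s : List Char) (j : Int) (c : Char) (cnt : Int) (hj : 0 ≤ j) :
    pvRightScan s (s.length : Int) j c cnt = cnt + pvScanM (s.drop j.toNat) c := by
  generalize hk : ((s.length : Int) - j).toNat = k
  induction k generalizing j c cnt with
  | zero =>
    have hj' : ¬ (j < (s.length : Int)) := by omega
    have hd : s.length ≤ j.toNat := by omega
    rw [pvRightScan, dif_neg hj', List.drop_eq_nil_of_le hd]
    simp [pvScanM]
  | succ k ih =>
    have hj' : j < (s.length : Int) := by omega
    have hjn : j.toNat < s.length := by omega
    rw [pvRightScan, dif_pos hj',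
      PySem.List.pyGet?_eq_some_getElem (xs := s) (i := j) hj (by exact_mod_cast hj')]
    dsimp only
    have hdrop : s.drop j.toNat = s[j.toNat] :: s.drop (j.toNat + 1) :=
      List.drop_eq_getElem_cons hjn
    by_cases hg : s[j.toNat] = c ∨ s[j.toNat] = 'w'
    · rw [if_pos hg, hdrop, pvScanM_cons_pos hg]
      by_cases hend : (s.length : Int) ≤ j + 1
      · have : s.length ≤ j.toNat + 1 := by omega
        rw [if_pos hend, List.drop_eq_nil_of_le this]
        simp [pvScanM]
      · rw [if_neg hend]
        have hjn1 : j.toNat + 1 < s.length := by omega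
        have hdrop1 : s.drop (j.toNat + 1) = s[j.toNat + 1] :: s.drop (j.toNat + 1 + 1) :=
          List.drop_eq_getElem_cons hjn1
        have hpeek : PySem.List.pyGetD s (j + 1) ' ' = s[j.toNat + 1] := by
          have h := PySem.List.pyGetD_eq_getElem (xs := s) (i := j + 1) (d := ' ')
            (by omega) (by omega)
          rw [h]
          congr 1
          omega
        have hupd : (if c = 'w' ∧ PySem.List.pyGetD s (j + 1) ' ' ≠ 'w'
              then PySem.List.pyGetD s (j + 1) ' ' else c) = pvUpd c (s.drop (j.toNat + 1)) := by
          rw [hpeek, hdrop1]; rfl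
        rw [hupd, ih (j + 1) _ _ (by omega) (by omega)]
        have : (j + 1).toNat = j.toNat + 1 := by omega
        rw [this]
        omega
    · rw [not_or] at hg
      rw [if_neg (by tauto), hdrop, pvScanM_cons_neg hg.1 hg.2]
      omega

theorem pvTakeRev (s : List Char) (n : Nat) (h : n < s.length) :
    (s.take (n + 1)).reverse = s[n] :: (s.take n).reverse := by
  rw [List.take_add_one, List.getElem?_eq_getElem h]
  simp

theorem pvLeftScan_model' (s : List Char) : ∀ (k : Nat), k < s.length → ∀ (c : Char) (cnt : Int),
    pvLeftScan s (k : Int) c cnt = cnt + pvScanM ((s.take (k + 1)).reverse) c := by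
  intro k
  induction k with
  | zero =>
    intro hk c cnt
    rw [pvLeftScan, dif_pos (by omega),
      PySem.List.pyGet?_eq_some_getElem (xs := s) (i := ((0 : Nat) : Int)) (by omega)
        (by exact_mod_cast hk)]
    dsimp only
    simp only [Nat.cast_zero, Int.toNat_zero]
    rw [pvTakeRev s 0 hk]
    simp only [List.take_zero, List.reverse_nil]
    rw [if_pos (show (0 : Int) - 1 < 0 by omega)]
    by_cases hg : s[0] = c ∨ s[0] = 'w'
    · rw [if_pos hg, pvScanM_cons_pos hg]
      norm_num [pvScanM]
    · rw [if_neg hg]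
      rw [not_or] at hg
      rw [pvScanM_cons_neg hg.1 hg.2]
      omega
  | succ k ih =>
    intro hk c cnt
    have hkk : k < s.length := by omega
    rw [pvLeftScan, dif_pos (by omega),
      PySem.List.pyGet?_eq_some_getElem (xs := s) (i := ((k + 1 : Nat) : Int)) (by omega)
        (by exact_mod_cast hk)]
    dsimp only
    simp only [Int.toNat_natCast]
    rw [pvTakeRev s (k + 1) hk]
    have hsub : ((k + 1 : Nat) : Int) - 1 = (k : Int) := by push_cast; ring
    rw [hsub, if_neg (show ¬ ((k : Int) < 0) by omega)]
    have hpeek : PySem.List.pyGetD s (k : Int) ' ' = s[k] := by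
      rw [PySem.List.pyGetD_natCast, List.getD_eq_getElem _ _ hkk]
    have hrest : (s.take (k + 1)).reverse = s[k] :: (s.take k).reverse := pvTakeRev s k hkk
    have hupd : (if c = 'w' ∧ PySem.List.pyGetD s (k : Int) ' ' ≠ 'w'
          then PySem.List.pyGetD s (k : Int) ' ' else c) = pvUpd c ((s.take (k + 1)).reverse) := by
      rw [hpeek, hrest]; rfl
    rw [hupd, ih hkk _ (cnt + 1)]
    by_cases hg : s[k + 1] = c ∨ s[k + 1] = 'w'
    · rw [if_pos hg, pvScanM_cons_pos hg]
      omega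
    · rw [not_or] at hg
      rw [if_neg (by tauto), pvScanM_cons_neg hg.1 hg.2]
      omega

theorem pvLeftScan_model (s : List Char) (l : Int) (c : Char) (cnt : Int)
    (h0 : 0 ≤ l) (h1 : l < (s.length : Int)) :
    pvLeftScan s l c cnt = cnt + pvScanM ((s.take (l.toNat + 1)).reverse) c := by
  have h := pvLeftScan_model' s l.toNat (by omega) c cnt
  rwa [show ((l.toNat : Nat) : Int) = l by omega] at h

theorem pvOkLen_all_w : ∀ (r : List Char), pvFirstNonW r = none →
    ∀ col, pvOkLen r col = (r.length : Int) := by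
  intro r
  induction r with
  | nil => intro _ col; simp [pvOkLen]
  | cons y r ih =>
    intro h col
    by_cases hy : y = 'w'
    · subst hy
      simp only [pvFirstNonW] at h
      rw [pvOkLen_w, ih h col]
      simp
      omega
    · simp [pvFirstNonW, hy] at h

theorem pvOkLen_some_first : ∀ (r : List Char) (c : Char), pvFirstNonW r = some c →
    pvOkLen r (some c) = pvOkLen r none := by
  intro r
  induction r with
  | nil => intro c h; simp [pvFirstNonW] at h
  | cons y r ih =>
    intro c h
    by_cases hy : y = 'w'
    · subst hy
      simp only [pvFirstNonW] at h
      rw [pvOkLen_w, pvOkLen_w, ih c h]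
    · simp only [pvFirstNonW, if_neg hy, Option.some.injEq] at h
      subst h
      rw [pvOkLen_cons_some_eq hy, pvOkLen_cons_none hy]

theorem pvOkLen_other : ∀ (r : List Char) (c x : Char), pvFirstNonW r = some c →
    x ≠ c → x ≠ 'w' → pvOkLen r (some x) = pvWCount r := by
  intro r
  induction r with
  | nil => intro c x h; simp [pvFirstNonW] at h
  | cons y r ih =>
    intro c x h hxc hx
    by_cases hy : y = 'w'
    · subst hy
      simp only [pvFirstNonW] at h
      rw [pvOkLen_w, ih c x h hxc hx]
      simp [pvWCount]
    · simp only [pvFirstNonW, if_neg hy, Option.some.injEq] at h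
      subst h
      rw [pvOkLen_cons_some_ne hy (Ne.symm hxc)]
      simp [pvWCount, hy]

theorem pvStep_spec (rev : List Char) (x : Char) (out : List Int) :
    pvStep (out, pvOkLen rev none, pvFirstNonW rev, pvWCount rev) x
      = (out ++ [pvOkLen (x :: rev) none], pvOkLen (x :: rev) none,
         pvFirstNonW (x :: rev), pvWCount (x :: rev)) := by
  by_cases hx : x = 'w'
  · subst hx
    simp [pvStep, pvOkLen_w, pvFirstNonW, pvWCount, add_comm]
  · cases hcol : pvFirstNonW rev with
    | none =>
      have hlen := pvOkLen_all_w rev hcol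
      simp [pvStep, hx, pvOkLen_cons_none hx, pvFirstNonW, pvWCount, hlen, add_comm]
    | some c =>
      by_cases hxc : x = c
      · subst hxc
        simp [pvStep, hx, pvOkLen_cons_none hx, pvOkLen_some_first rev x hcol,
          pvFirstNonW, pvWCount, add_comm]
      · simp [pvStep, hx, hxc, pvOkLen_cons_none hx,
          pvOkLen_other rev c x hcol hxc hx, pvFirstNonW, pvWCount, add_comm]

theorem pvRunLengths_invariant : ∀ (t : List Char),
    t.foldl pvStep ([], 0, none, 0)
      = ((List.range t.length).map (fun k => pvOkLen ((t.take (k + 1)).reverse) none),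
         pvOkLen t.reverse none, pvFirstNonW t.reverse, pvWCount t.reverse) := by
  intro t
  induction t using List.reverseRecOn with
  | nil => rfl
  | append_singleton t x ih =>
    rw [List.foldl_append, ih, List.foldl_cons, List.foldl_nil]
    have hrev : (t ++ [x]).reverse = x :: t.reverse := by simp
    have hmap : (List.range (t ++ [x]).length).map
          (fun k => pvOkLen (((t ++ [x]).take (k + 1)).reverse) none)
        = (List.range t.length).map (fun k => pvOkLen ((t.take (k + 1)).reverse) none)
          ++ [pvOkLen (x :: t.reverse) none] := by
      rw [List.length_append, List.length_singleton, List.range_succ, List.map_append,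
        List.map_cons, List.map_nil]
      congr 1
      · apply List.map_congr_left
        intro k hk
        rw [List.mem_range] at hk
        rw [List.take_append_of_le_length (by omega)]
      · rw [List.take_of_length_le (by simp), hrev]
    rw [hmap, hrev, pvStep_spec]

theorem pvScanM_head (x : Char) (r : List Char) :
    pvScanM (x :: r) x = pvOkLen (x :: r) none := by
  have h := pvScanM_eq_okLen (x :: r) none (by simp)
  by_cases hx : x = 'w'
  · subst hx; simpa [pvRep] using h
  · rwa [show pvRep none (x :: r) = x by simp [pvRep, hx]] at h

-- the total A computes at break point i
def pvTot (s : List Char) (n i : Int) : Int :=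
  pvLeftScan s i (PySem.List.pyGetD s i ' ') 0
    + pvRightScan s n (i + 1) (PySem.List.pyGetD s (i + 1) ' ') 0

theorem pvIteMax (b t : Int) : (if b < t then t else b) = max b t := by
  rw [max_def]; split_ifs <;> omega

theorem pvSeedLe (T : Int → Int) (l : List Int) (b : Int) :
    b ≤ l.foldl (fun b k => max b (T k)) b :=
  (PySem.List.le_foldl_max_int l T b).1

theorem pvFloorTwo (n0 : Int) : PySem.Int.floordiv (2 * n0) 2 = n0 := by
  rw [PySem.Int.floordiv_eq_ediv_of_pos (by omega)]
  omega

theorem pvMainLoop_min (s : List Char) (n0 : Int) :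
    ∀ (i maxc : Int), 0 ≤ i → maxc < n0 →
    pvMainLoop s (2 * n0) i maxc
      = min n0 ((PySem.List.pyRange i (2 * n0 - 1) 1).foldl
          (fun b k => max b (pvTot s (2 * n0) k)) maxc) := by
  intro i maxc h0 hmax
  generalize hk : (2 * n0 - 1 - i).toNat = k
  induction k generalizing i maxc with
  | zero =>
    rw [pvMainLoop, dif_neg (by omega), PySem.List.pyRange_one_eq_nil (by omega), List.foldl_nil]
    omega
  | succ k ih =>
    have hi : i < 2 * n0 - 1 := by omega
    rw [pvMainLoop, dif_pos hi, PySem.List.pyRange_one_cons (by omega), List.foldl_cons]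
    dsimp only
    rw [← show pvTot s (2 * n0) i
        = pvLeftScan s i (PySem.List.pyGetD s i ' ') 0
          + pvRightScan s (2 * n0) (i + 1) (PySem.List.pyGetD s (i + 1) ' ') 0 from rfl,
      pvIteMax maxc (pvTot s (2 * n0) i)]
    by_cases hbig : n0 ≤ max maxc (pvTot s (2 * n0) i)
    · rw [if_pos (by omega), pvFloorTwo]
      have hle := pvSeedLe (pvTot s (2 * n0)) (PySem.List.pyRange (i + 1) (2 * n0 - 1) 1)
        (max maxc (pvTot s (2 * n0) i))
      omega
    · rw [if_neg (by omega)]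
      exact ih (i + 1) _ (by omega) (by omega) (by omega)

theorem pvRunLengths_get (s : List Char) (k : Int) (h0 : 0 ≤ k) (h1 : k < (s.length : Int)) :
    PySem.List.pyGetD (pvRunLengths s) k 0
      = pvOkLen ((s.take (k.toNat + 1)).reverse) none := by
  have hkn : k.toNat < s.length := by omega
  rw [pvRunLengths, pvRunLengths_invariant s]
  dsimp only
  rw [PySem.List.pyGetD_eq_getElem (xs := (List.range s.length).map
      (fun k => pvOkLen ((s.take (k + 1)).reverse) none)) (i := k) (d := 0) h0 (by simpa using h1)]
  simp

theorem pvRight_get (s : List Char) (j : Int) (h0 : 0 ≤ j) (h1 : j < (s.length : Int)) :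
    PySem.List.pyGetD ((pvRunLengths s.reverse).reverse) j 0
      = pvOkLen (s.drop j.toNat) none := by
  have hjn : j.toNat < s.length := by omega
  rw [pvRunLengths, pvRunLengths_invariant s.reverse]
  dsimp only
  rw [PySem.List.pyGetD_eq_getElem (xs := ((List.range s.reverse.length).map
      (fun k => pvOkLen ((s.reverse.take (k + 1)).reverse) none)).reverse) (i := j) (d := 0)
      h0 (by simpa using h1)]
  rw [List.getElem_reverse]
  simp only [List.getElem_map, List.getElem_range, List.length_map, List.length_range,
    List.length_reverse]
  have h2 : s.length - 1 - j.toNat + 1 = s.length - j.toNat := by omega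
  rw [h2, List.take_reverse, List.reverse_reverse]
  rw [show s.length - (s.length - j.toNat) = j.toNat by omega]

theorem pvTot_eq (s : List Char) (k : Int) (h0 : 0 ≤ k) (h1 : k + 1 < (s.length : Int)) :
    pvTot s (s.length : Int) k
      = PySem.List.pyGetD (pvRunLengths s) k 0
        + PySem.List.pyGetD ((pvRunLengths s.reverse).reverse) (k + 1) 0 := by
  have hkn : k.toNat < s.length := by omega
  have hk1n : (k + 1).toNat < s.length := by omega
  have hgl : PySem.List.pyGetD s k ' ' = s[k.toNat] :=
    PySem.List.pyGetD_eq_getElem (xs := s) (i := k) (d := ' ') h0 (by omega)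
  have hgr : PySem.List.pyGetD s (k + 1) ' ' = s[(k + 1).toNat] :=
    PySem.List.pyGetD_eq_getElem (xs := s) (i := k + 1) (d := ' ') (by omega) (by omega)
  rw [pvTot, hgl, hgr, pvLeftScan_model s k _ 0 h0 (by omega),
    pvRightScan_model s (k + 1) _ 0 (by omega)]
  rw [pvTakeRev s k.toNat hkn, pvScanM_head,
    List.drop_eq_getElem_cons hk1n, pvScanM_head,
    ← List.drop_eq_getElem_cons hk1n, ← pvTakeRev s k.toNat hkn]
  rw [pvRunLengths_get s k h0 (by omega), pvRight_get s (k + 1) (by omega) h1]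
  omega

theorem pv_main (necklace : String) : max_beads_n2 necklace = max_beads_n2_alt necklace := by
  unfold max_beads_n2 max_beads_n2_alt
  dsimp only
  by_cases h0 : necklace.toList.length = 0
  · rw [List.length_eq_zero_iff.mp h0]
    rw [pvMainLoop, dif_neg (by simp), PySem.List.pyRange_one_eq_nil (by simp)]
    simp
  · set t := necklace.toList with ht
    set s : List Char := t ++ t with hs
    have hm : (s.length : Int) = 2 * (t.length : Int) := by
      rw [hs, List.length_append]; push_cast; ring
    set n0 : Int := (t.length : Int) with hn0
    have hpos : 0 < n0 := by omega
    rw [hm, pvMainLoop_min s n0 0 0 le_rfl (by omega)]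
    have hfold : ∀ (l : List Int), (∀ k ∈ l, 0 ≤ k ∧ k + 1 < (s.length : Int)) →
        ∀ (b : Int), l.foldl (fun b k => max b (pvTot s (2 * n0) k)) b
          = l.foldl (fun b k =>
              let tt := PySem.List.pyGetD (pvRunLengths s) k 0
                + PySem.List.pyGetD ((pvRunLengths s.reverse).reverse) (k + 1) 0
              if b < tt then tt else b) b := by
      intro l hl b
      apply PySem.List.foldl_congr_mem
      intro acc x hx
      rw [pvIteMax]
      have := pvTot_eq s x (hl x hx).1 (hl x hx).2
      rw [hm] at this
      rw [← this]
    rw [hfold (PySem.List.pyRange 0 (2 * n0 - 1) 1)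
      (by
        intro k hk
        rw [PySem.List.mem_pyRange_one] at hk
        constructor
        · exact hk.1
        · omega) 0]

-- ===== VERDICT (by name: the statement is the Claim_ definition above) =====
theorem max_beads_n2_spec : Claim_equal_max_beads_n2 := by
  intro necklace _
  unfold Spec_max_beads_n2
  exact pv_main necklace
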